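-- pv_equiv track=rewrite | github.com/jeffdh5/fanduel-dashboard | scraper/misc/rotowire.py | get_last_n_stories
-- ===== SOURCE A (Python) =====
-- def get_last_n_stories(story_log, n=50):
-- 	old_stories = []
-- 	while len(story_log) >= 5 and n > 0:
-- 		story = tuple([l.strip() for l in story_log[-5:-1]])
-- 		story_log = story_log[0:-5]
-- 		old_stories.append(story)
-- 		n = n-1
-- 	return old_stories
-- ===== SOURCE B (Python) =====
-- def get_last_n_stories(story_log, n=50):
--     # Closed-form count of chunks up front, then one forward pass over the
--     # tail-aligned suffix, emitted in reverse (last chunk first) to match A.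
--     m = min(n, len(story_log) // 5)
--     if m <= 0:
--         return []
--     suffix = story_log[len(story_log) - 5 * m:]
--     return [tuple(l.strip() for l in suffix[5 * j:5 * j + 4])
--             for j in range(m - 1, -1, -1)]
-- ===== Notes on version B (the rewrite author's own statement) =====
-- stated objective: faster
-- what changed: A's while-loop that repeatedly re-slices the list (story_log[-5:-1], story_log[0:-5]) and appends is replaced by computing the chunk count m = min(n, len//5) up front, taking the tail-aligned suffix of length 5*m once, and emitting the m stripped 4-line windows in one reverse-indexed comprehension.
import Mathlib
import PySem

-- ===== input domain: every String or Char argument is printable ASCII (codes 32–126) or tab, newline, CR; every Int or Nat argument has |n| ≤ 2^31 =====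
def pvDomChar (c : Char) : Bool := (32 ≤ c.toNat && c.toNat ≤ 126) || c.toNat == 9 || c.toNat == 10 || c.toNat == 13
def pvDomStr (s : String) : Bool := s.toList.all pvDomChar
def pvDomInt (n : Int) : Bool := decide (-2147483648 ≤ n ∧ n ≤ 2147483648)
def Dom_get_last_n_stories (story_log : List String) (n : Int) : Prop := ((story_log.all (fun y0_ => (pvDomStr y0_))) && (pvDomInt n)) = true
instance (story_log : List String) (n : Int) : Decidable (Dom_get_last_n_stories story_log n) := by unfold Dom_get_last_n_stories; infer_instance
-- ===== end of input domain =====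

-- B replaces A's repeated-slicing while-loop by an up-front chunk count and a single
-- forward pass over the tail suffix, emitted in reverse order (objective: alternative).

-- ===== PORT A =====
def get_last_n_stories_loop (story_log : List String) (n : Int)
    (acc : List (List String)) : List (List String) :=
  if 5 ≤ story_log.length ∧ 0 < n then
    -- story = [l.strip() for l in story_log[-5:-1]]; story_log = story_log[0:-5]; append; n -= 1
    get_last_n_stories_loop (PySem.List.slice story_log (some 0) (some (-5))) (n - 1)
      (acc ++ [(PySem.List.slice story_log (some (-5)) (some (-1))).map PySem.Str.strip])
  else acc
termination_by story_log.length
decreasing_by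
  rename_i h
  simp only [PySem.List.slice_zero_start]
  rw [PySem.List.slice_to_neg_ofNat story_log 5 (by omega)]
  simp only [List.length_take]
  omega

def get_last_n_stories (story_log : List String) (n : Int) : List (List String) :=
  get_last_n_stories_loop story_log n []

-- ===== PORT B =====
def get_last_n_stories_alt (story_log : List String) (n : Int) : List (List String) :=
  let m := min n (PySem.Int.floordiv (story_log.length : Int) 5)
  if m ≤ 0 then []
  else
    let suffix := PySem.List.slice story_log (some ((story_log.length : Int) - 5 * m)) none
    (PySem.List.pyRange (m - 1) (-1) (-1)).map
      (fun j => (PySem.List.slice suffix (some (5 * j)) (some (5 * j + 4))).map PySem.Str.strip)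

-- ===== PRECONDITION & SPEC =====
def Spec_get_last_n_stories (story_log : List String) (n : Int) (out : List (List String)) : Prop := out = get_last_n_stories_alt story_log n
instance (story_log : List String) (n : Int) (out : List (List String)) : Decidable (Spec_get_last_n_stories story_log n out) := by unfold Spec_get_last_n_stories; infer_instance

-- ===== CLAIM (what is proved, stated in full; the proofs are below) =====
def Claim_equal_get_last_n_stories : Prop := ∀ (story_log : List String) (n : Int), Dom_get_last_n_stories story_log n → Spec_get_last_n_stories story_log n (get_last_n_stories story_log n)

-- ===== LEMMAS AND PROOFS =====

-- B returns [] exactly when A's loop never runs.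
lemma alt_nil (sl : List String) (n : Int) (h : ¬ (5 ≤ sl.length ∧ 0 < n)) :
    get_last_n_stories_alt sl n = [] := by
  unfold get_last_n_stories_alt
  rw [PySem.Int.floordiv_eq_ediv_of_pos (by norm_num)]
  rw [if_pos (by omega)]

-- Closed form of B: the k-th emitted story is the stripped 4-line window ending 1 before
-- position len - 5*k.
lemma alt_closed (sl : List String) (n : Int) (mn : Nat)
    (hm : min n ((sl.length : Int) / 5) = (mn : Int)) :
    get_last_n_stories_alt sl n =
      (List.range mn).map
        (fun k => ((sl.drop (sl.length - 5 * (k + 1))).take 4).map PySem.Str.strip) := by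
  have h5mn : 5 * mn ≤ sl.length := by omega
  unfold get_last_n_stories_alt
  rw [PySem.Int.floordiv_eq_ediv_of_pos (by norm_num : (0:Int) < 5), hm]
  by_cases h0 : mn = 0
  · subst h0; simp
  · rw [if_neg (by omega)]
    rw [PySem.List.pyRange_neg_one]
    have hcast : ((mn : Int) - 1 - (-1)).toNat = mn := by omega
    rw [hcast, List.map_map]
    apply List.map_congr_left
    intro k hk
    simp only [List.mem_range] at hk
    simp only [Function.comp]
    have hsuffix : PySem.List.slice sl (some ((sl.length : Int) - 5 * (mn : Int))) none
        = sl.drop (sl.length - 5 * mn) := by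
      have e : ((sl.length : Int) - 5 * (mn : Int)) = ((sl.length - 5 * mn : Nat) : Int) := by
        omega
      rw [e, PySem.List.slice_from_natCast]
    rw [hsuffix]
    rw [PySem.List.slice_toNat _ (by omega) (by omega)]
    have t1 : (5 * ((mn : Int) - 1 - (k : Int))).toNat = 5 * (mn - 1 - k) := by omega
    have t2 : (5 * ((mn : Int) - 1 - (k : Int)) + 4).toNat
        - (5 * ((mn : Int) - 1 - (k : Int))).toNat = 4 := by omega
    rw [t2, t1, List.drop_drop]
    congr 3
    omega

-- One step of B's closed form equals one iteration of A's loop.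
lemma alt_step (sl : List String) (n : Int) (h5 : 5 ≤ sl.length) (hn : 0 < n) :
    get_last_n_stories_alt sl n =
      (((sl.drop (sl.length - 5)).take 4).map PySem.Str.strip) ::
        get_last_n_stories_alt (sl.take (sl.length - 5)) (n - 1) := by
  obtain ⟨mn, hmn, hmn1⟩ : ∃ mn : Nat, min n ((sl.length : Int) / 5) = (mn : Int) ∧ 1 ≤ mn :=
    ⟨(min n ((sl.length : Int) / 5)).toNat, by omega, by omega⟩
  have h5m : 5 * mn ≤ sl.length := by omega
  have hlen' : (sl.take (sl.length - 5)).length = sl.length - 5 := by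
    simp [List.length_take]
  have hm' : min (n - 1) (((sl.take (sl.length - 5)).length : Int) / 5) = ((mn - 1 : Nat) : Int) := by
    rw [hlen']; omega
  rw [alt_closed sl n mn hmn, alt_closed _ _ _ hm', hlen']
  obtain ⟨mk, rfl⟩ : ∃ mk, mn = mk + 1 := ⟨mn - 1, by omega⟩
  rw [List.range_succ_eq_map]
  simp only [List.map_cons, List.map_map, Nat.add_sub_cancel]
  congr 1
  apply List.map_congr_left
  intro a ha
  simp only [List.mem_range] at ha
  simp only [Function.comp_apply, Nat.succ_eq_add_one]
  have e1 : sl.length - 5 - 5 * (a + 1) = sl.length - 5 * (a + 1 + 1) := by omega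
  have e2 : min 4 (sl.length - 5 - (sl.length - 5 * (a + 1 + 1))) = 4 := by omega
  rw [List.drop_take, List.take_take, e1, e2]

lemma loop_acc (k : Nat) : ∀ (sl : List String), sl.length ≤ k → ∀ (n : Int) (acc : List (List String)),
    get_last_n_stories_loop sl n acc = acc ++ get_last_n_stories_loop sl n [] := by
  induction k with
  | zero =>
    intro sl hk n acc
    have h : ¬ (5 ≤ sl.length ∧ 0 < n) := by omega
    rw [get_last_n_stories_loop, if_neg h, get_last_n_stories_loop, if_neg h]
    simp
  | succ k ih =>
    intro sl hk n acc
    by_cases hc : 5 ≤ sl.length ∧ 0 < n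
    · conv_lhs => rw [get_last_n_stories_loop, if_pos hc]
      conv_rhs => rw [get_last_n_stories_loop, if_pos hc]
      have hlen : (PySem.List.slice sl (some 0) (some (-5))).length ≤ k := by
        simp only [PySem.List.slice_zero_start]
        rw [PySem.List.slice_to_neg_ofNat sl 5 (by omega)]
        simp only [List.length_take]; omega
      conv_rhs => rw [List.nil_append, ih _ hlen]
      rw [ih _ hlen]
      simp
    · rw [get_last_n_stories_loop, if_neg hc, get_last_n_stories_loop, if_neg hc]
      simp

lemma loop_eq_alt (k : Nat) : ∀ (sl : List String), sl.length ≤ k → ∀ (n : Int),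
    get_last_n_stories_loop sl n [] = get_last_n_stories_alt sl n := by
  induction k with
  | zero =>
    intro sl hk n
    rw [get_last_n_stories_loop, if_neg (by omega), alt_nil sl n (by omega)]
  | succ k ih =>
    intro sl hk n
    by_cases hc : 5 ≤ sl.length ∧ 0 < n
    · conv_lhs => rw [get_last_n_stories_loop, if_pos hc]
      have hsl' : PySem.List.slice sl (some 0) (some (-5)) = sl.take (sl.length - 5) := by
        simp only [PySem.List.slice_zero_start]
        rw [PySem.List.slice_to_neg_ofNat sl 5 (by omega)]
      have hstory : PySem.List.slice sl (some (-5)) (some (-1)) =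
          (sl.drop (sl.length - 5)).take 4 := by
        simp [PySem.List.slice, pysem]
        omega
      have hlen : (PySem.List.slice sl (some 0) (some (-5))).length ≤ k := by
        rw [hsl']; simp only [List.length_take]; omega
      rw [loop_acc k _ hlen, ih _ hlen, hsl', hstory, alt_step sl n hc.1 hc.2]
      simp
    · rw [get_last_n_stories_loop, if_neg hc, alt_nil sl n hc]

-- ===== VERDICT (by name: the statement is the Claim_ definition above) =====
theorem get_last_n_stories_spec : Claim_equal_get_last_n_stories := by
  intro sl n _
  unfold Spec_get_last_n_stories get_last_n_stories
  exact loop_eq_alt sl.length sl le_rfl n
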